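-- pv_equiv track=rewrite | github.com/nulinspiratie/paperscraper | send_email/HTML_tools.py | authors_to_HTML
-- ===== SOURCE A (Python) =====
-- def authors_to_HTML(authors, bold_authors=[], max_authors=None):
--     HTML_authors = []
--     author_idx = 0
--     for k, author in enumerate(authors):
--         if author in bold_authors:
--             if author_idx > 0:
--                 HTML_authors += [f'({author_idx})']
--                 author_idx = 0
--             HTML_authors += [f'<b>{repr(author)}</b>']
--         elif 0 < k < len(authors) -1 and max_authors is not None and len(authors) > max_authors:
--             author_idx += 1
--         else:
--             if author_idx > 0:
--                 HTML_authors += [f'({author_idx})']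
--                 author_idx = 0
--             HTML_authors += [str(author)]
--
--     HTML = ', '.join(HTML_authors)
--     HTML = f'<i>{HTML}</i>'
--     return HTML
-- ===== SOURCE B (Python) =====
-- from itertools import groupby
--
--
-- def authors_to_HTML(authors, bold_authors=[], max_authors=None):
--     n = len(authors)
--     collapsing = max_authors is not None and n > max_authors
--
--     def token(k, author):
--         if author in bold_authors:
--             return f'<b>{repr(author)}</b>'
--         if collapsing and 0 < k < n - 1:
--             return None
--         return str(author)
--
--     tokens = [token(k, a) for k, a in enumerate(authors)]
--
--     parts = []
--     for is_gap, group in groupby(tokens, key=lambda t: t is None):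
--         if is_gap:
--             parts.append(f'({len(list(group))})')
--         else:
--             parts.extend(group)
--     return f'<i>{", ".join(parts)}</i>'
-- ===== Notes on version B (the rewrite author's own statement) =====
-- stated objective: alternative
-- what changed: A's single stateful loop with a running collapse counter is replaced by a two-pass decomposition: a map pass producing one token per author (bold HTML, plain name, or a None collapse sentinel) followed by an itertools.groupby pass that renders each run of sentinels as '(count)'.
import Mathlib
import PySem

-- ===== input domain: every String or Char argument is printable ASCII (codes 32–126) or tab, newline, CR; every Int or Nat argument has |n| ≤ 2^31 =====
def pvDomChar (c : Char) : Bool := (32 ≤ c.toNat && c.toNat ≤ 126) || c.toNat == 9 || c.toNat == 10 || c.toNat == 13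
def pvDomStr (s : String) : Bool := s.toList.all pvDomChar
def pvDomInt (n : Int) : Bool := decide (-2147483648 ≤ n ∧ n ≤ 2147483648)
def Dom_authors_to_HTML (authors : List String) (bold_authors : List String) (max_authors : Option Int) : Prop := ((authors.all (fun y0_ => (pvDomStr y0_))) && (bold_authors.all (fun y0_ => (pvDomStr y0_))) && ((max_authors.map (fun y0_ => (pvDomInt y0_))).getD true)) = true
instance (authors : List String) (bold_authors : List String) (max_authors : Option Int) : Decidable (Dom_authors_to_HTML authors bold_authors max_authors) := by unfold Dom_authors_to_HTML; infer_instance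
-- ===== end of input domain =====

-- B restructures A's stateful counter loop as a map pass (token per author, with a
-- sentinel for collapsed positions) followed by a groupby pass; objective: alternative.

-- shared primitive: port of Python's repr() on str, exact on the Dom alphabet
-- (printable ASCII plus tab/newline/CR)
def pvReprEsc (q : Char) (c : Char) : List Char :=
  if c = '\\' then ['\\', '\\']
  else if c = q then ['\\', q]
  else if c = Char.ofNat 9 then ['\\', 't']
  else if c = Char.ofNat 10 then ['\\', 'n']
  else if c = Char.ofNat 13 then ['\\', 'r']
  else [c]

def pvRepr (s : String) : String :=
  let cs := s.toList
  let q := if cs.contains '\'' && !(cs.contains '"') then '"' else '\''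
  String.ofList ((q :: cs.flatMap (pvReprEsc q)) ++ [q])

-- ===== PORT A =====
-- A's loop body: state = (HTML_authors, author_idx)
def pvStepA (bold_authors : List String) (n : Int) (max_authors : Option Int)
    (st : List String × Int) (ka : Int × String) : List String × Int :=
  let acc := st.1; let idx := st.2; let k := ka.1; let author := ka.2
  if author ∈ bold_authors then
    ((if idx > 0 then acc ++ ["(" ++ PySem.Int.toStr idx ++ ")"] else acc)
       ++ ["<b>" ++ pvRepr author ++ "</b>"], 0)
  else if 0 < k ∧ k < n - 1 ∧ (match max_authors with | none => false | some m => decide (n > m)) = true then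
    (acc, idx + 1)
  else
    ((if idx > 0 then acc ++ ["(" ++ PySem.Int.toStr idx ++ ")"] else acc)
       ++ [author], 0)

def authors_to_HTML (authors : List String) (bold_authors : List String) (max_authors : Option Int) : String :=
  let st := (PySem.List.enumerate authors).foldl
              (pvStepA bold_authors (authors.length : Int) max_authors) ([], 0)
  "<i>" ++ PySem.Str.join ", " st.1 ++ "</i>"

-- ===== PORT B =====
-- map pass: one token per author; none = the collapse sentinel
def pvToken (bold_authors : List String) (n : Int) (collapsing : Bool)
    (k : Int) (author : String) : Option String :=
  if author ∈ bold_authors then some ("<b>" ++ pvRepr author ++ "</b>")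
  else if collapsing ∧ 0 < k ∧ k < n - 1 then none
  else some author

-- group pass (port of the groupby loop): a run of sentinels becomes '(len)',
-- other tokens are emitted as they are
def pvGroups : List (Option String) → List String
  | [] => []
  | some s :: ts => s :: pvGroups ts
  | none :: ts =>
      let gap := ts.takeWhile (fun t => t = none)
      let rest := ts.dropWhile (fun t => t = none)
      ("(" ++ PySem.Int.toStr ((gap.length : Int) + 1) ++ ")") :: pvGroups rest
termination_by ts => ts.length
decreasing_by
  all_goals simp [List.length_cons, List.length_dropWhile_le]

def authors_to_HTML_alt (authors : List String) (bold_authors : List String) (max_authors : Option Int) : String :=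
  let n : Int := (authors.length : Int)
  let collapsing := match max_authors with | none => false | some m => decide (n > m)
  let tokens := (PySem.List.enumerate authors).map
                  (fun ka => pvToken bold_authors n collapsing ka.1 ka.2)
  "<i>" ++ PySem.Str.join ", " (pvGroups tokens) ++ "</i>"

-- ===== PRECONDITION & SPEC =====
def Spec_authors_to_HTML (authors : List String) (bold_authors : List String) (max_authors : Option Int) (out : String) : Prop := out = authors_to_HTML_alt authors bold_authors max_authors
instance (authors : List String) (bold_authors : List String) (max_authors : Option Int) (out : String) : Decidable (Spec_authors_to_HTML authors bold_authors max_authors out) := by unfold Spec_authors_to_HTML; infer_instance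

-- ===== CLAIM (what is proved, stated in full; the proofs are below) =====
def Claim_equal_authors_to_HTML : Prop := ∀ (authors : List String) (bold_authors : List String) (max_authors : Option Int), Dom_authors_to_HTML authors bold_authors max_authors → Spec_authors_to_HTML authors bold_authors max_authors (authors_to_HTML authors bold_authors max_authors)

-- ===== LEMMAS AND PROOFS =====

-- A's loop body expressed on tokens (proof helper)
def pvStepT (st : List String × Int) (t : Option String) : List String × Int :=
  match t with
  | some s => ((if st.2 > 0 then st.1 ++ ["(" ++ PySem.Int.toStr st.2 ++ ")"] else st.1) ++ [s], 0)
  | none => (st.1, st.2 + 1)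

-- reference rendering of a token list with a pending collapse counter
def pvRenderP (idx : Int) : List (Option String) → List String
  | [] => []
  | some s :: ts =>
      (if idx > 0 then ["(" ++ PySem.Int.toStr idx ++ ")"] else []) ++ s :: pvRenderP 0 ts
  | none :: ts => pvRenderP (idx + 1) ts

-- A's step applied to (k, author) is the token-step on B's token
theorem stepA_eq_token (bold : List String) (n : Int) (mx : Option Int)
    (st : List String × Int) (k : Int) (a : String) :
    pvStepA bold n mx st (k, a) =
      pvStepT st (pvToken bold n
        (match mx with | none => false | some m => decide (n > m)) k a) := by
  unfold pvStepA pvToken pvStepT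
  by_cases hb : a ∈ bold
  · simp [hb]
  · cases mx with
    | none => simp [hb]
    | some m =>
      by_cases hc : 0 < k ∧ k < n - 1 ∧ n > m
      · simp [hb, hc.1, hc.2.1, hc.2.2]
      · have h5 : ¬ (0 < k ∧ k < n - 1 ∧ m < n) := fun h => hc ⟨h.1, h.2.1, h.2.2⟩
        have h6 : ¬ (m < n ∧ 0 < k ∧ k < n - 1) := fun h => hc ⟨h.2.1, h.2.2, h.1⟩
        simp [hb, h5, h6]

-- the token fold accumulates exactly pvRenderP
theorem foldl_token_render (ts : List (Option String)) :
    ∀ (acc : List String) (idx : Int),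
    (ts.foldl pvStepT (acc, idx)).1 = acc ++ pvRenderP idx ts := by
  induction ts with
  | nil => intro acc idx; simp [pvRenderP]
  | cons t ts ih =>
    intro acc idx
    cases t with
    | some s =>
      simp only [List.foldl_cons, pvStepT, pvRenderP, ih]
      split_ifs <;> simp
    | none => simp [pvStepT, pvRenderP, ih]

-- shifting a run of sentinels into the pending counter
theorem renderP_replicate (m : Nat) : ∀ (idx : Int) (ts : List (Option String)),
    pvRenderP idx (List.replicate m none ++ ts) = pvRenderP (idx + m) ts := by
  induction m with
  | zero => intro idx ts; simp
  | succ m ih =>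
    intro idx ts
    simp only [List.replicate_succ, List.cons_append, pvRenderP, ih]
    congr 1
    push_cast
    ring

theorem getLast?_replicate_none (n : Nat) :
    (List.replicate (n + 1) (none : Option String)).getLast? = some none := by
  induction n with
  | zero => simp
  | succ n ih =>
    rw [List.replicate_succ,
      show (none :: List.replicate (n + 1) (none : Option String)) =
        [none] ++ List.replicate (n + 1) none from rfl,
      List.getLast?_append_of_ne_nil _ (by simp)]
    exact ih

-- pvGroups agrees with pvRenderP 0 on token lists not ending in a sentinel
theorem groups_eq_renderP : ∀ (ts : List (Option String)),
    ts.getLast? ≠ some none → pvGroups ts = pvRenderP 0 ts := by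
  intro ts
  induction ts using pvGroups.induct with
  | case1 => intro _; simp [pvGroups, pvRenderP]
  | case2 s ts ih =>
    intro h
    have h' : ts.getLast? ≠ some none := by
      cases ts with
      | nil => simp
      | cons x xs => rw [List.getLast?_cons_cons] at h; exact h
    rw [pvGroups, pvRenderP, ih h']
    simp
  | case3 ts rest ih =>
    intro h
    have hsplit : ts.takeWhile (fun t => decide (t = none))
        ++ ts.dropWhile (fun t => decide (t = none)) = ts := List.takeWhile_append_dropWhile
    have hrepl : ts.takeWhile (fun t => decide (t = none)) =
        List.replicate (ts.takeWhile (fun t => decide (t = none))).length none := by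
      apply List.eq_replicate_of_mem
      intro x hx
      simpa using List.mem_takeWhile_imp hx
    have hne : ts.dropWhile (fun t => decide (t = none)) ≠ [] := by
      intro hnil
      have hts : ts = List.replicate (ts.takeWhile (fun t => decide (t = none))).length none := by
        conv_lhs => rw [← hsplit]
        rw [hnil, List.append_nil]; exact hrepl
      apply h
      have : (none :: ts) =
          List.replicate ((ts.takeWhile (fun t => decide (t = none))).length + 1) none := by
        rw [List.replicate_succ, ← hts]
      rw [this, getLast?_replicate_none]
    obtain ⟨r, rs, hr⟩ := List.exists_cons_of_ne_nil hne
    obtain ⟨s, hs⟩ : ∃ s, r = some s := by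
      have hdw := List.head?_dropWhile_not (fun t : Option String => decide (t = none)) ts
      rw [hr] at hdw
      cases r with
      | none => simp at hdw
      | some s => exact ⟨s, rfl⟩
    have hts : ts = List.replicate (ts.takeWhile (fun t => decide (t = none))).length none
        ++ (some s :: rs) := by
      conv_lhs => rw [← hsplit]
      rw [← hrepl, hr, hs]
    have h' : (ts.dropWhile (fun t => decide (t = none))).getLast? ≠ some none := by
      intro hl
      apply h
      rw [show (none :: ts) = [none] ++ ts from rfl,
        List.getLast?_append_of_ne_nil _ (by rw [hts]; simp)]
      conv_lhs => rw [← hsplit]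
      rw [List.getLast?_append_of_ne_nil _ hne]
      exact hl
    rw [pvGroups]
    rw [ih h']
    simp only [rest]
    rw [hr, hs]
    conv_rhs => rw [pvRenderP, hts, renderP_replicate]
    rw [pvRenderP, pvRenderP]
    have hpos : (0:Int) + 1 + ((ts.takeWhile (fun t => decide (t = none))).length : Int) > 0 := by
      positivity
    rw [if_pos hpos,
      show (0:Int) + 1 + ((ts.takeWhile (fun t => decide (t = none))).length : Int) =
        ((ts.takeWhile (fun t => decide (t = none))).length : Int) + 1 from by ring]
    simp

-- the last token of B's map pass is never the sentinel
theorem last_token_some (authors bold : List String) (c : Bool) :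
    (((PySem.List.enumerate authors).map
        (fun ka => pvToken bold (authors.length : Int) c ka.1 ka.2)).getLast? ≠ some none) := by
  rcases eq_or_ne authors [] with h | h
  · subst h; simp [PySem.List.enumerate]
  · have hpos : 0 < authors.length := List.length_pos_iff.mpr h
    have hlt : authors.length - 1 < authors.length := by omega
    have hget : ((PySem.List.enumerate authors).map
        (fun ka => pvToken bold (authors.length : Int) c ka.1 ka.2)).getLast? =
        some (pvToken bold (authors.length : Int) c
          ((0 : Int) + (authors.length - 1 : Nat)) (authors[authors.length - 1])) := by
      rw [List.getLast?_eq_getElem?]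
      have hlen : ((PySem.List.enumerate authors).map
          (fun ka => pvToken bold (authors.length : Int) c ka.1 ka.2)).length = authors.length := by
        simp [PySem.List.length_enumerate]
      rw [hlen, List.getElem?_map, PySem.List.getElem?_enumerate]
      simp [List.getElem?_eq_getElem hlt]
    rw [hget]
    intro hcontra
    simp only [Option.some.injEq] at hcontra
    unfold pvToken at hcontra
    split_ifs at hcontra with h1 h2
    · rcases h2 with ⟨-, -, h3⟩
      have : ((authors.length - 1 : Nat) : Int) = (authors.length : Int) - 1 := by omega
      rw [zero_add, this] at h3
      omega

-- ===== VERDICT (by name: the statement is the Claim_ definition above) =====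
theorem authors_to_HTML_spec : Claim_equal_authors_to_HTML := by
  intro authors bold mx hdom
  clear hdom
  unfold Spec_authors_to_HTML authors_to_HTML authors_to_HTML_alt
  simp only
  have hfun : pvStepA bold (authors.length : Int) mx =
      (fun st (ka : Int × String) => pvStepT st (pvToken bold (authors.length : Int)
        (match mx with | none => false | some m => decide ((authors.length : Int) > m)) ka.1 ka.2)) := by
    funext st ka
    obtain ⟨k, a⟩ := ka
    exact stepA_eq_token bold _ mx st k a
  rw [hfun, ← List.foldl_map, foldl_token_render, List.nil_append]
  clear hfun
  rw [← groups_eq_renderP _ (last_token_some authors bold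
      (match mx with | none => false | some m => decide ((authors.length : Int) > m)))]
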